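-- pv_equiv track=rewrite | github.com/jintyjops/webframe | core/route.py | __is_route_match
-- ===== SOURCE A (Python) =====
-- def __is_route_match(candidate, requested):
--     """Return dictionary of callables."""
--     # TODO implement a better algorithm for this (more efficient)
--     # split and remove empty.
--     requested = [piece for piece in requested.split('/') if piece != '']
--     candidate = [piece for piece in candidate.split('/') if piece != '']
--
--     if len(requested) != len(candidate):
--         return False
--
--     for req, cand in zip(requested, candidate):
--         # If candidate is a param then skip
--         if cand[0] == '{' and cand[-1] == '}':
--             continue
--         # Break if any differences found.
--         if req != cand:
--             return False
--
--     return True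
-- ===== SOURCE B (Python) =====
-- def __is_route_match(candidate, requested):
--     """Return dictionary of callables."""
--     def segments(path):
--         return [p for p in path.split('/') if p != '']
--
--     def match(cs, rs):
--         # simultaneous descent: length mismatch falls out of the recursion
--         if not cs or not rs:
--             return cs == rs
--         c = cs[0]
--         if (c[0] == '{' and c[-1] == '}') or c == rs[0]:
--             return match(cs[1:], rs[1:])
--         return False
--
--     return match(segments(candidate), segments(requested))
-- ===== Notes on version B (the rewrite author's own statement) =====
-- stated objective: simpler
-- what changed: Replaces the explicit length check plus zip loop with a single recursive simultaneous descent over the two segment lists (length mismatch and literal/placeholder comparison handled by one recursion).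
import Mathlib
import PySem

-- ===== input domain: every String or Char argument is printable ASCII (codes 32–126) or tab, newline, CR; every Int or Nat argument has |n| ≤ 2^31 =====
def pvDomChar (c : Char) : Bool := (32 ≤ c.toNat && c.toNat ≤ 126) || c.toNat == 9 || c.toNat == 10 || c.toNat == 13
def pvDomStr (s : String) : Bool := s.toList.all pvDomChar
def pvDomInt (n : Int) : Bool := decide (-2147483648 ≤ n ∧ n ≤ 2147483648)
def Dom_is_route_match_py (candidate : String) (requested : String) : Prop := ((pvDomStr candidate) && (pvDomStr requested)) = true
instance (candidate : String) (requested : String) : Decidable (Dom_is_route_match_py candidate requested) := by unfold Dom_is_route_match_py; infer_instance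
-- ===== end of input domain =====

-- B replaces A's explicit length check + zip loop by one recursive simultaneous
-- descent over the two segment lists (objective: simpler; same asymptotic cost).

-- ===== PORT A =====
-- [p for p in s.split('/') if p != '']  ('/' ≠ "", so split? is always `some`; getD never takes its default)
def pvSplitNonEmptyA (s : String) : List String :=
  ((PySem.Str.split? s "/").getD []).filter (fun p => decide (p ≠ ""))

-- the for-loop over zip(requested, candidate) with its early `return False`
def pvLoopA : List (String × String) → Bool
  | [] => true
  | (req, cand) :: rest =>
      if PySem.Str.pyGet? cand 0 = some '{' ∧ PySem.Str.pyGet? cand (-1) = some '}' then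
        pvLoopA rest
      else if req ≠ cand then false
      else pvLoopA rest

def is_route_match_py (candidate : String) (requested : String) : Bool :=
  let requested' := pvSplitNonEmptyA requested
  let candidate' := pvSplitNonEmptyA candidate
  if requested'.length ≠ candidate'.length then false
  else pvLoopA (requested'.zip candidate')

-- ===== PORT B =====
-- segments(path)
def pvSegmentsB (path : String) : List String :=
  ((PySem.Str.split? path "/").getD []).filter (fun p => decide (p ≠ ""))

-- match(cs, rs): recursive simultaneous descent
def pvMatchB : List String → List String → Bool
  | [], [] => true
  | [], _ :: _ => false
  | _ :: _, [] => false
  | c :: cs, r :: rs =>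
      if (PySem.Str.pyGet? c 0 = some '{' ∧ PySem.Str.pyGet? c (-1) = some '}') ∨ c = r then
        pvMatchB cs rs
      else false

def is_route_match_py_alt (candidate : String) (requested : String) : Bool :=
  pvMatchB (pvSegmentsB candidate) (pvSegmentsB requested)

-- ===== PRECONDITION & SPEC =====
def Spec_is_route_match_py (candidate : String) (requested : String) (out : Bool) : Prop := out = is_route_match_py_alt candidate requested
instance (candidate : String) (requested : String) (out : Bool) : Decidable (Spec_is_route_match_py candidate requested out) := by unfold Spec_is_route_match_py; infer_instance

-- ===== CLAIM (what is proved, stated in full; the proofs are below) =====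
def Claim_equal_is_route_match_py : Prop := ∀ (candidate : String) (requested : String), Dom_is_route_match_py candidate requested → Spec_is_route_match_py candidate requested (is_route_match_py candidate requested)

-- ===== LEMMAS AND PROOFS =====

-- B's descent equals A's length test combined with A's zip loop, on ANY two lists.
theorem pvMatchB_eq (cs : List String) : ∀ rs : List String,
    pvMatchB cs rs = ((rs.length == cs.length) && pvLoopA (rs.zip cs)) := by
  induction cs with
  | nil =>
      intro rs; cases rs <;> simp [pvMatchB, pvLoopA]
  | cons c cs ih =>
      intro rs
      cases rs with
      | nil => simp [pvMatchB]
      | cons r rs =>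
          by_cases hp : PySem.List.pyGet? c.toList 0 = some '{' ∧ PySem.List.pyGet? c.toList (-1) = some '}'
          · simp [pvMatchB, pvLoopA, hp, ih rs]
          · by_cases he : c = r
            · subst he
              simp [pvMatchB, pvLoopA, hp, ih rs]
            · have he' : r ≠ c := fun h => he h.symm
              simp [pvMatchB, pvLoopA, hp, he, he']

theorem pvSeg_eq (s : String) : pvSegmentsB s = pvSplitNonEmptyA s := rfl

-- ===== VERDICT (by name: the statement is the Claim_ definition above) =====
theorem is_route_match_py_spec : Claim_equal_is_route_match_py := by
  intro candidate requested _
  unfold Spec_is_route_match_py is_route_match_py is_route_match_py_alt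
  rw [pvSeg_eq, pvSeg_eq, pvMatchB_eq]
  by_cases h : (pvSplitNonEmptyA requested).length = (pvSplitNonEmptyA candidate).length
  · simp [h]
  · simp [h]
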